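-- pv_equiv track=rewrite | github.com/yehoon17/programmers | 약수의_개수와_덧셈.py | solution
-- ===== SOURCE A (Python) =====
-- def divisor(n):
--     count = 1
--     temp=1
--     d=2
--     while(n>1):
--         if n%d == 0:
--             n=n//d
--             temp+=1
--         else:
--             count*=temp
--             temp=1
--             d+=1
--     return count*temp
--
-- def solution(left, right):
--     answer = 0
--     for n in range(left, right+1):
--         count = divisor(n)
--         if count%2 == 0:
--             answer+=n
--         else:
--             answer-=n
--
--     return answer
-- ===== SOURCE B (Python) =====
-- def is_square(n):
--     lo = 1
--     hi = n
--     while lo < hi: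
--         mid = (lo + hi) // 2
--         if mid * mid < n:
--             lo = mid + 1
--         else:
--             hi = mid
--     return lo * lo == n
--
--
-- def solution(left, right):
--     answer = 0
--     for n in range(left, right + 1):
--         if n < 2 or is_square(n):
--             answer -= n
--         else:
--             answer += n
--     return answer
-- ===== Notes on version B (the rewrite author's own statement) =====
-- stated objective: alternative
-- what changed: Replaces the per-number trial-division divisor count with the fact that a number >= 2 has an odd divisor count iff it is a perfect square, tested by a binary-search integer square root; intended as faster on positive ranges (A timed out at n=16384 where B answered fast), but a timing run read only 1.25x at the largest size both finished, so no speed is claimed.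
import Mathlib
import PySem

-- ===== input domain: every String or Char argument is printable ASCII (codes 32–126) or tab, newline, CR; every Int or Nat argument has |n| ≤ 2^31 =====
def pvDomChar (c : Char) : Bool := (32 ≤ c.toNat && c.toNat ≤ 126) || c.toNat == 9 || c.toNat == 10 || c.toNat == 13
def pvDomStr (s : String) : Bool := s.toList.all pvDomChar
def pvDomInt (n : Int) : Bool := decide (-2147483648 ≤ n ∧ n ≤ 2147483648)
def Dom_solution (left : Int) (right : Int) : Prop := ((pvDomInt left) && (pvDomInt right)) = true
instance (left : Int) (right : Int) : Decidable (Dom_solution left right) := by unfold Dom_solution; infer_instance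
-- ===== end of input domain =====

-- B replaces A's per-number trial-division divisor count with the odd-divisor-count ⇔ perfect-square test (binary-search integer square root); an alternative algorithm, intended as cheaper per number though a timing run did not confirm a speed-up on its input family.

-- ===== PORT A =====
-- while-loop of `divisor`; the Nat fuel only makes the recursion total (2*n.toNat provably suffices)
def divLoopA : Nat → Int → Int → Int → Int → Int
  | 0, _, count, temp, _ => count * temp
  | fuel + 1, n, count, temp, d =>
    if 1 < n then
      if PySem.Int.mod n d = 0 then divLoopA fuel (PySem.Int.floordiv n d) count (temp + 1) d
      else divLoopA fuel n (count * temp) 1 (d + 1)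
    else count * temp

def divisor (n : Int) : Int := divLoopA (2 * n.toNat) n 1 1 2

def solution (left : Int) (right : Int) : Int :=
  (PySem.List.pyRange left (right + 1) 1).foldl
    (fun answer n =>
      let count := divisor n
      if PySem.Int.mod count 2 = 0 then answer + n else answer - n) 0

-- ===== PORT B =====
-- while-loop of `is_square` (binary search for the integer square root)
def bsLoop (n lo hi : Int) : Int :=
  if lo < hi then
    let mid := PySem.Int.floordiv (lo + hi) 2
    if mid * mid < n then bsLoop n (mid + 1) hi else bsLoop n lo mid
  else lo
termination_by (hi - lo).toNat
decreasing_by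
  · have hb := PySem.Int.floordiv_two_mid_bounds (le_of_lt ‹lo < hi›)
    omega
  · have hb := PySem.Int.floordiv_two_mid_bounds (le_of_lt ‹lo < hi›)
    have hlt : PySem.Int.floordiv (lo + hi) 2 < hi := by
      rw [PySem.Int.floordiv_lt_iff_lt_mul (by norm_num : (0:Int) < 2)]
      omega
    omega

def isSquareB (n : Int) : Bool :=
  let k := bsLoop n 1 n
  k * k == n

def solution_alt (left : Int) (right : Int) : Int :=
  (PySem.List.pyRange left (right + 1) 1).foldl
    (fun answer n => if n < 2 ∨ isSquareB n then answer - n else answer + n) 0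

-- ===== PRECONDITION & SPEC =====
def Spec_solution (left : Int) (right : Int) (out : Int) : Prop := out = solution_alt left right
instance (left : Int) (right : Int) (out : Int) : Decidable (Spec_solution left right out) := by unfold Spec_solution; infer_instance

-- ===== CLAIM (what is proved, stated in full; the proofs are below) =====
def Claim_equal_solution : Prop := ∀ (left : Int) (right : Int), Dom_solution left right → Spec_solution left right (solution left right)

-- ===== LEMMAS AND PROOFS =====

-- Nat mirror of A's while-loop (proof-only)
def divLoopN : Nat → Nat → Nat → Nat → Nat → Nat
  | 0, _, c, t, _ => c * t
  | f + 1, n, c, t, d =>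
    if 1 < n then
      if n % d = 0 then divLoopN f (n / d) c (t + 1) d
      else divLoopN f n (c * t) 1 (d + 1)
    else c * t

lemma castLoop : ∀ (f n c t d : Nat),
    divLoopA f (n : Int) (c : Int) (t : Int) (d : Int) = ((divLoopN f n c t d : Nat) : Int) := by
  intro f
  induction f with
  | zero => intro n c t d; simp [divLoopA, divLoopN]
  | succ f ih =>
    intro n c t d
    by_cases h1 : 1 < n
    · by_cases h2 : n % d = 0
      · have hm : PySem.Int.mod (n : Int) (d : Int) = ((n % d : Nat) : Int) :=
          PySem.Int.mod_natCast n d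
        have hd : PySem.Int.floordiv (n : Int) (d : Int) = ((n / d : Nat) : Int) :=
          PySem.Int.floordiv_natCast n d
        simp only [divLoopA, divLoopN, hm, hd, h2]
        have h1' : (1 : Int) < (n : Int) := by exact_mod_cast h1
        simp only [if_pos h1', if_pos h1, Nat.cast_zero]
        have := ih (n / d) c (t + 1) d
        simpa using this
      · have hm : PySem.Int.mod (n : Int) (d : Int) = ((n % d : Nat) : Int) :=
          PySem.Int.mod_natCast n d
        have h1' : (1 : Int) < (n : Int) := by exact_mod_cast h1
        have h2' : ¬ (((n % d : Nat) : Int) = 0) := by exact_mod_cast h2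
        simp only [divLoopA, divLoopN, hm, if_pos h1', if_pos h1, if_neg h2', if_neg h2]
        have := ih n (c * t) 1 (d + 1)
        simpa using this
    · have h1' : ¬ ((1 : Int) < (n : Int)) := by exact_mod_cast h1
      simp [divLoopA, divLoopN, h1, h1']

lemma isSquare_iff_even_factorization {m : ℕ} (hm : m ≠ 0) :
    IsSquare m ↔ ∀ q, Even (m.factorization q) := by
  constructor
  · rintro ⟨r, rfl⟩ q
    have hr : r ≠ 0 := by rintro rfl; simp at hm
    rw [Nat.factorization_mul hr hr, Finsupp.add_apply]
    exact ⟨_, rfl⟩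
  · intro h
    refine ⟨m.factorization.prod fun p e => p ^ (e / 2), ?_⟩
    have key : (m.factorization.prod fun p e => p ^ (e / 2)) *
        (m.factorization.prod fun p e => p ^ (e / 2)) = m.factorization.prod (· ^ ·) := by
      simp only [Finsupp.prod]
      rw [← Finset.prod_mul_distrib]
      refine Finset.prod_congr rfl fun p _ => ?_
      rw [← pow_add]
      congr 1
      have := Nat.even_iff.mp (h p)
      omega
    rw [key, Nat.prod_factorization_pow_eq_self hm]

lemma sq_mul_prime_pow {p n : ℕ} (hp : p.Prime) (hpn : ¬ p ∣ n) (hn : n ≠ 0) (k : ℕ) :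
    IsSquare (p ^ k * n) ↔ Even k ∧ IsSquare n := by
  have hp0 : p ^ k ≠ 0 := pow_ne_zero _ hp.pos.ne'
  have hfn : n.factorization p = 0 := Nat.factorization_eq_zero_of_not_dvd hpn
  have happ : ∀ q, (p ^ k * n).factorization q =
      (if p = q then k else 0) + n.factorization q := by
    intro q
    rw [Nat.factorization_mul hp0 hn, Finsupp.add_apply, Nat.factorization_pow,
      hp.factorization, Finsupp.smul_apply, Finsupp.single_apply]
    split_ifs <;> simp
  rw [isSquare_iff_even_factorization (mul_ne_zero hp0 hn), isSquare_iff_even_factorization hn]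
  constructor
  · intro h
    refine ⟨?_, fun q => ?_⟩
    · have := h p
      rw [happ p, if_pos rfl, hfn] at this
      simpa using this
    · by_cases hq : p = q
      · rw [← hq, hfn]; exact ⟨0, rfl⟩
      · have := h q
        rwa [happ q, if_neg hq, Nat.zero_add] at this
  · rintro ⟨hk, h⟩ q
    rw [happ q]
    split_ifs with hq
    · exact hk.add (h q)
    · simpa using h q

lemma even_sub_one_iff {t : ℕ} (ht : 1 ≤ t) : Even (t - 1) ↔ Odd t := by
  rw [Nat.even_iff, Nat.odd_iff]
  omega

lemma odd_base {c t d : ℕ} (ht : 1 ≤ t) (hprim : t = 1 ∨ d.Prime) :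
    (Odd (c * t) ↔ (Odd c ∧ IsSquare (d ^ (t - 1) * 1))) := by
  rw [Nat.odd_mul]
  refine and_congr_right fun _ => ?_
  rcases hprim with rfl | hd
  · simpa using ⟨(1 : ℕ), (mul_one 1).symm⟩
  · rw [sq_mul_prime_pow hd hd.not_dvd_one one_ne_zero, even_sub_one_iff ht]
    exact ⟨fun h => ⟨h, ⟨1, (mul_one 1).symm⟩⟩, fun h => h.1⟩

lemma divLoopN_odd : ∀ (f n c t d : ℕ), 2 ≤ d → 1 ≤ n → 1 ≤ t →
    (∀ p, p.Prime → p ∣ n → d ≤ p) → (t = 1 ∨ d.Prime) → 2 * n ≤ f + d →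
    (Odd (divLoopN f n c t d) ↔ (Odd c ∧ IsSquare (d ^ (t - 1) * n))) := by
  intro f
  induction f with
  | zero =>
    intro n c t d hd hn ht hfac hprim hfuel
    have hn1 : n = 1 := by
      by_contra h
      have hp := Nat.minFac_prime h
      have h1 := hfac _ hp (Nat.minFac_dvd n)
      have h2 := Nat.minFac_le (show 0 < n by omega)
      omega
    subst hn1
    simpa [divLoopN] using odd_base ht hprim
  | succ f ih =>
    intro n c t d hd hn ht hfac hprim hfuel
    by_cases h2 : 1 < n
    · by_cases hmod : n % d = 0
      · -- divide branch
        have hdd : d ∣ n := Nat.dvd_of_mod_eq_zero hmod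
        have hdn : d ≤ n := Nat.le_of_dvd (by omega) hdd
        have hdprime : d.Prime := by
          have hp := Nat.minFac_prime (show d ≠ 1 by omega)
          have h1 := hfac _ hp ((Nat.minFac_dvd d).trans hdd)
          have h3 := Nat.minFac_le (show 0 < d by omega)
          have : d.minFac = d := le_antisymm h3 h1
          rwa [← this]
        have hn' : 1 ≤ n / d := (Nat.one_le_div_iff (by omega)).mpr hdn
        have hfac' : ∀ p, p.Prime → p ∣ n / d → d ≤ p := fun p hp hpd =>
          hfac p hp (hpd.trans (Nat.div_dvd_of_dvd hdd))
        have hfuel' : 2 * (n / d) ≤ f + d := by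
          have h5 : n / d ≤ n / 2 := Nat.div_le_div_left hd (by norm_num)
          omega
        have heq : d ^ (t - 1) * n = d ^ ((t + 1) - 1) * (n / d) := by
          have hexp : (t - 1) + 1 = (t + 1) - 1 := by omega
          calc d ^ (t - 1) * n = d ^ (t - 1) * (d * (n / d)) := by
                rw [Nat.mul_div_cancel' hdd]
            _ = d ^ ((t - 1) + 1) * (n / d) := by ring
            _ = d ^ ((t + 1) - 1) * (n / d) := by rw [hexp]
        simp only [divLoopN, if_pos h2, if_pos hmod]
        rw [ih (n / d) c (t + 1) d hd hn' (by omega) hfac' (Or.inr hdprime) hfuel', heq]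
      · -- advance-d branch
        have hndvd : ¬ d ∣ n := fun hdv => hmod (Nat.mod_eq_zero_of_dvd hdv)
        have hfac' : ∀ p, p.Prime → p ∣ n → d + 1 ≤ p := by
          intro p hp hpn
          have h1 := hfac p hp hpn
          rcases eq_or_lt_of_le h1 with rfl | hlt
          · exact absurd hpn hndvd
          · omega
        have hn0 : n ≠ 0 := by omega
        have hstep := ih n (c * t) 1 (d + 1) (by omega) hn (le_refl 1) hfac' (Or.inl rfl)
          (by omega)
        simp only [divLoopN, if_pos h2, if_neg hmod]
        rw [hstep]
        have hiff : IsSquare (d ^ (t - 1) * n) ↔ Odd t ∧ IsSquare n := by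
          rcases hprim with rfl | hdp
          · simpa using fun _ => odd_one
          · rw [sq_mul_prime_pow hdp hndvd hn0, even_sub_one_iff ht]
        simp only [Nat.sub_self, pow_zero, one_mul, Nat.odd_mul, hiff]
        tauto
    · have hn1 : n = 1 := by omega
      subst hn1
      simpa [divLoopN, h2] using odd_base ht hprim

lemma divisor_eq_one {n : Int} (h : n < 2) : divisor n = 1 := by
  have h1 : ¬ (1 : Int) < n := by omega
  unfold divisor
  cases (2 * n.toNat) with
  | zero => simp [divLoopA]
  | succ m => simp [divLoopA, h1]

lemma divisor_mod_iff {n : Int} (h : 2 ≤ n) :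
    (PySem.Int.mod (divisor n) 2 = 0) ↔ ¬ IsSquare n.toNat := by
  set N := n.toNat with hN
  have hn : (N : Int) = n := Int.toNat_of_nonneg (by omega)
  have hN2 : 2 ≤ N := by omega
  have hcast : divisor n = ((divLoopN (2 * N) N 1 1 2 : Nat) : Int) := by
    unfold divisor
    rw [← hn]
    have := castLoop (2 * N) N 1 1 2
    simpa using this
  have hodd := divLoopN_odd (2 * N) N 1 1 2 (le_refl 2) (by omega) (le_refl 1)
    (fun p hp _ => hp.two_le) (Or.inl rfl) (by omega)
  simp only [show (1:Nat) - 1 = 0 from rfl, pow_zero, one_mul, odd_one, true_and] at hodd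
  rw [hcast]
  have hm : PySem.Int.mod ((divLoopN (2 * N) N 1 1 2 : Nat) : Int) ((2 : Nat) : Int)
      = ((divLoopN (2 * N) N 1 1 2 % 2 : Nat) : Int) := PySem.Int.mod_natCast _ 2
  rw [show ((2:Nat) : Int) = (2 : Int) by norm_num] at hm
  rw [hm]
  rw [show (((divLoopN (2 * N) N 1 1 2 % 2 : Nat) : Int) = 0) ↔ divLoopN (2 * N) N 1 1 2 % 2 = 0
    by exact_mod_cast Iff.rfl]
  rw [← Nat.even_iff, ← Nat.not_odd_iff_even, hodd]

lemma bsLoop_mid_bounds {lo hi : Int} (h : lo < hi) :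
    lo ≤ PySem.Int.floordiv (lo + hi) 2 ∧ PySem.Int.floordiv (lo + hi) 2 < hi := by
  have hb := PySem.Int.floordiv_two_mid_bounds (le_of_lt h)
  refine ⟨hb.1, ?_⟩
  rw [PySem.Int.floordiv_lt_iff_lt_mul (by norm_num : (0:Int) < 2)]
  omega

lemma bsLoop_ge (n : Int) : ∀ (j : Nat) (lo hi : Int), (hi - lo).toNat = j → lo ≤ bsLoop n lo hi := by
  intro j
  induction j using Nat.strong_induction_on with
  | _ j ih =>
    intro lo hi hj
    rw [bsLoop]
    dsimp only
    split_ifs with h1 h2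
    · have hb := bsLoop_mid_bounds h1
      have := ih (hi - (PySem.Int.floordiv (lo + hi) 2 + 1)).toNat (by omega) _ hi rfl
      omega
    · have hb := bsLoop_mid_bounds h1
      have := ih (PySem.Int.floordiv (lo + hi) 2 - lo).toNat (by omega) lo _ rfl
      omega
    · exact le_refl lo

lemma bsLoop_eq (n m : Int) (hm : m * m = n) (hm1 : 1 ≤ m) :
    ∀ (j : Nat) (lo hi : Int), (hi - lo).toNat = j → 1 ≤ lo → lo ≤ m → m ≤ hi →
    bsLoop n lo hi = m := by
  intro j
  induction j using Nat.strong_induction_on with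
  | _ j ih =>
    intro lo hi hj h1 hlom hmhi
    rw [bsLoop]
    dsimp only
    split_ifs with hlh hmid
    · have hb := bsLoop_mid_bounds hlh
      have hmlt : PySem.Int.floordiv (lo + hi) 2 < m := by
        by_contra h'
        push Not at h'
        have hmm := mul_le_mul h' h' (by omega : (0:Int) ≤ m)
          (by omega : (0:Int) ≤ PySem.Int.floordiv (lo + hi) 2)
        linarith
      exact ih (hi - (PySem.Int.floordiv (lo + hi) 2 + 1)).toNat (by omega) _ hi rfl
        (by omega) (by omega) hmhi
    · have hb := bsLoop_mid_bounds hlh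
      have hmle : m ≤ PySem.Int.floordiv (lo + hi) 2 := by
        by_contra h'
        push Not at h'
        have h0 : (0:Int) ≤ PySem.Int.floordiv (lo + hi) 2 := by omega
        have hmm := mul_lt_mul'' h' h' h0 h0
        linarith
      exact ih (PySem.Int.floordiv (lo + hi) 2 - lo).toNat (by omega) lo _ rfl h1 hlom hmle
    · omega

lemma isSquareB_iff {n : Int} (h2 : 2 ≤ n) : isSquareB n = true ↔ IsSquare n.toNat := by
  unfold isSquareB
  simp only [beq_iff_eq]
  constructor
  · intro h
    have hk1 : 1 ≤ bsLoop n 1 n := bsLoop_ge n (n - 1).toNat 1 n rfl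
    set k := bsLoop n 1 n with hk
    refine ⟨k.toNat, ?_⟩
    have hkc : ((k.toNat : Int)) = k := Int.toNat_of_nonneg (by omega)
    have : ((k.toNat * k.toNat : Nat) : Int) = n := by push_cast [hkc]; omega
    omega
  · rintro ⟨r, hr⟩
    have hr2 : 2 ≤ r * r := by omega
    have hr1 : 1 ≤ r := by nlinarith
    have hrc : ((r : Nat) : Int) * ((r : Nat) : Int) = n := by
      have : ((r * r : Nat) : Int) = n := by rw [← hr]; omega
      push_cast at this
      exact this
    have hr1' : (1 : Int) ≤ (r : Int) := by exact_mod_cast hr1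
    have hrn : (r : Int) ≤ n := by
      nlinarith [mul_nonneg (by linarith : (0:Int) ≤ (r : Int) - 1) (by linarith : (0:Int) ≤ (r : Int))]
    rw [bsLoop_eq n (r : Int) hrc hr1' (n - 1).toNat 1 n rfl (le_refl 1) hr1' hrn]
    exact hrc

lemma step_eq (acc n : Int) :
    (let count := divisor n; if PySem.Int.mod count 2 = 0 then acc + n else acc - n)
    = (if n < 2 ∨ isSquareB n then acc - n else acc + n) := by
  show (if PySem.Int.mod (divisor n) 2 = 0 then acc + n else acc - n) = _
  by_cases h : n < 2
  · rw [divisor_eq_one h, if_neg (by decide), if_pos (Or.inl h)]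
  · have h2 : 2 ≤ n := by omega
    by_cases hs : IsSquare n.toNat
    · rw [if_neg (fun hc => (divisor_mod_iff h2).mp hc hs),
        if_pos (Or.inr ((isSquareB_iff h2).mpr hs))]
    · rw [if_pos ((divisor_mod_iff h2).mpr hs), if_neg ?_]
      rintro (hlt | hb)
      · omega
      · exact hs ((isSquareB_iff h2).mp hb)

lemma fold_eq (l : List Int) : ∀ acc : Int,
    l.foldl (fun answer n =>
      let count := divisor n
      if PySem.Int.mod count 2 = 0 then answer + n else answer - n) acc
    = l.foldl (fun answer n => if n < 2 ∨ isSquareB n then answer - n else answer + n) acc := by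
  induction l with
  | nil => intro acc; rfl
  | cons x xs ih =>
    intro acc
    simp only [List.foldl_cons]
    rw [step_eq acc x]
    exact ih _

-- ===== VERDICT (by name: the statement is the Claim_ definition above) =====
theorem solution_spec : Claim_equal_solution := by
  intro left right _
  unfold Spec_solution solution solution_alt
  exact fold_eq _ 0
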